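-- pv_equiv track=rewrite | github.com/GianM0027/Multiple-Vehicle-Routing-Problem | SMT/newSMT.py | find_routes
-- ===== SOURCE A (Python) =====
-- def find_routes(routes, current_node, remaining_edges, current_route):
--     if current_node == 0 and len(current_route) > 1:
--         routes.append(list(current_route))
--     else:
--         for i in range(len(remaining_edges)):
--             if remaining_edges[i][0] == current_node:
--                 next_node = remaining_edges[i][1]
--                 current_route.append(remaining_edges[i])
--                 find_routes(routes, next_node, remaining_edges[:i] + remaining_edges[i + 1:], current_route)
--                 current_route.pop()
--
--     solution_route = []
--     for i in range(len(routes)):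
--         temp_route = []
--         for s in routes[i]:
--             temp_route.append(s[0])
--         temp_route = temp_route[1:]
--         solution_route.append(temp_route)
--
--     return solution_route
-- ===== SOURCE B (Python) =====
-- def find_routes(routes, current_node, remaining_edges, current_route):
--     # Iterative DFS with an explicit stack instead of recursion; same
--     # mutation of `routes` (appends completed routes in the same pre-order).
--     stack = [(current_node, remaining_edges, list(current_route))]
--     while stack:
--         node, edges, route = stack.pop()
--         if node == 0 and len(route) > 1:
--             routes.append(route)
--         else:
--             children = [(e[1], edges[:i] + edges[i + 1:], route + [e])
--                         for i, e in enumerate(edges) if e[0] == node]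
--             stack.extend(reversed(children))
--     return [[e[0] for e in r][1:] for r in routes]
-- ===== Notes on version B (the rewrite author's own statement) =====
-- stated objective: alternative
-- what changed: Replaced A's recursive backtracking (recursion + append/pop on current_route) with an iterative DFS over an explicit stack of (node, remaining_edges, route) states, pushing children in reverse so completed routes appear in the same pre-order, and building the result with comprehensions instead of nested index loops.
import Mathlib
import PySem

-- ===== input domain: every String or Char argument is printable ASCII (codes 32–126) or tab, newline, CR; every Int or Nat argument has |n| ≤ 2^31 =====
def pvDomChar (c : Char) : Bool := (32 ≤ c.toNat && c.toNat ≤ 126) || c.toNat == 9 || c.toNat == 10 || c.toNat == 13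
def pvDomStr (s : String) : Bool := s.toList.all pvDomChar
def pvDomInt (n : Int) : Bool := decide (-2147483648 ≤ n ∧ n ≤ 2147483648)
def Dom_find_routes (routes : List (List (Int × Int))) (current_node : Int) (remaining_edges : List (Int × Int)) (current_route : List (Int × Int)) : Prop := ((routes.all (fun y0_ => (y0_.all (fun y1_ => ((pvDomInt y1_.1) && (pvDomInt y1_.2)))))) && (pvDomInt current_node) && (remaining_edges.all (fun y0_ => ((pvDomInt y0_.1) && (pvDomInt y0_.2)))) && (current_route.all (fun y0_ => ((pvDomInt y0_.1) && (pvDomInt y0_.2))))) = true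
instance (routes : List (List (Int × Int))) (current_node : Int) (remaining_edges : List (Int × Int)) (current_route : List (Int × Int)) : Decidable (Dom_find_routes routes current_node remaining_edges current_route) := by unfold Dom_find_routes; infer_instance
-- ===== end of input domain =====

-- B replaces A's recursive backtracking with an explicit stack-based DFS (same
-- pre-order of completed routes, same mutation of `routes`); objective: alternative
-- decomposition, equal return value. The equivalence proved is about the return value;
-- both A and B append the completed routes to the passed `routes` list in place.
-- Both ports use a fuel argument only as a totality guard (proved sufficient below).

-- ===== PORT A =====
-- A's recursion; each recursive call drops one edge, so fuel = remaining_edges.length + 1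
-- can never run out (proved in the lemmas below).
def findRoutesRecA : Nat → List (List (Int × Int)) → Int → List (Int × Int) → List (Int × Int) → List (List (Int × Int))
  | 0, routes, _, _, _ => routes  -- fuel guard, never reached with the fuel supplied below
  | fuel + 1, routes, current_node, remaining_edges, current_route =>
    if current_node = 0 ∧ 1 < current_route.length then routes ++ [current_route]
    else
      -- `for i in range(len(remaining_edges)): if remaining_edges[i][0] == current_node: …`
      (List.range remaining_edges.length).foldl
        (fun rs i =>
          let e := remaining_edges.getD i (0, 0)
          if e.1 = current_node then
            findRoutesRecA fuel rs e.2
              (remaining_edges.take i ++ remaining_edges.drop (i + 1))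
              (current_route ++ [e])
          else rs)
        routes

def find_routes (routes : List (List (Int × Int))) (current_node : Int) (remaining_edges : List (Int × Int)) (current_route : List (Int × Int)) : List (List Int) :=
  let rs := findRoutesRecA (remaining_edges.length + 1) routes current_node remaining_edges current_route
  -- the two result-building loops of A, as folds appending to the accumulators
  rs.foldl (fun sol r => sol ++ [(r.foldl (fun t s => t ++ [s.1]) []).drop 1]) []

-- ===== PORT B =====
-- Source B's children comprehension: `[(e[1], edges[:i]+edges[i+1:], route+[e]) for i, e in enumerate(edges) if e[0] == node]`
def pvChildrenB (node : Int) (edges : List (Int × Int)) (route : List (Int × Int)) :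
    List (Int × List (Int × Int) × List (Int × Int)) :=
  (edges.zipIdx.filter (fun p => p.1.1 == node)).map
    (fun p => (p.1.2, edges.take p.2 ++ edges.drop (p.2 + 1), route ++ [p.1]))

-- fuel bound for the stack loop: pvBound n bounds the number of DFS states reachable
-- from a state with n remaining edges (proved sufficient below)
def pvBound : Nat → Nat
  | 0 => 1
  | n + 1 => 1 + (n + 1) * pvBound n

-- Source B's `while stack:` loop; head of the list is the top of the stack, so
-- `stack.extend(reversed(children)); stack.pop()` is `children ++ rest`.
def findRoutesLoopB : Nat → List (Int × List (Int × Int) × List (Int × Int)) → List (List (Int × Int)) → List (List (Int × Int))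
  | _, [], routes => routes
  | 0, _, routes => routes  -- fuel guard, never reached with the fuel supplied below
  | fuel + 1, (node, edges, route) :: rest, routes =>
    if node = 0 ∧ 1 < route.length then findRoutesLoopB fuel rest (routes ++ [route])
    else findRoutesLoopB fuel (pvChildrenB node edges route ++ rest) routes

def find_routes_alt (routes : List (List (Int × Int))) (current_node : Int) (remaining_edges : List (Int × Int)) (current_route : List (Int × Int)) : List (List Int) :=
  (findRoutesLoopB (pvBound remaining_edges.length)
      [(current_node, remaining_edges, current_route)] routes).map
    (fun r => (r.map Prod.fst).drop 1)

-- ===== PRECONDITION & SPEC =====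
def Spec_find_routes (routes : List (List (Int × Int))) (current_node : Int) (remaining_edges : List (Int × Int)) (current_route : List (Int × Int)) (out : List (List Int)) : Prop := out = find_routes_alt routes current_node remaining_edges current_route
instance (routes : List (List (Int × Int))) (current_node : Int) (remaining_edges : List (Int × Int)) (current_route : List (Int × Int)) (out : List (List Int)) : Decidable (Spec_find_routes routes current_node remaining_edges current_route out) := by unfold Spec_find_routes; infer_instance

-- ===== CLAIM (what is proved, stated in full; the proofs are below) =====
def Claim_equal_find_routes : Prop := ∀ (routes : List (List (Int × Int))) (current_node : Int) (remaining_edges : List (Int × Int)) (current_route : List (Int × Int)), Dom_find_routes routes current_node remaining_edges current_route → Spec_find_routes routes current_node remaining_edges current_route (find_routes routes current_node remaining_edges current_route)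

-- ===== LEMMAS AND PROOFS =====

-- proof-side reference recursion (fuel-free, well-founded): A's DFS
mutual
def pvRecSpec (routes : List (List (Int × Int))) (node : Int)
    (edges : List (Int × Int)) (route : List (Int × Int)) : List (List (Int × Int)) :=
  if node = 0 ∧ 1 < route.length then routes ++ [route]
  else pvGoSpec routes node edges route 0
termination_by (edges.length, 1, 0)

def pvGoSpec (routes : List (List (Int × Int))) (node : Int)
    (edges : List (Int × Int)) (route : List (Int × Int)) (i : Nat) : List (List (Int × Int)) :=
  if h : i < edges.length then
    let e := edges[i]
    let routes' :=
      if e.1 = node then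
        pvRecSpec routes e.2 (edges.take i ++ edges.drop (i + 1)) (route ++ [e])
      else routes
    pvGoSpec routes' node edges route (i + 1)
  else routes
termination_by (edges.length, 0, edges.length - i)
decreasing_by
  · have : (edges.take i ++ edges.drop (i + 1)).length = edges.length - 1 := by
      simp [List.length_take, List.length_drop]; omega
    simp only [this]
    exact Prod.Lex.left _ _ (by omega)
  · exact Prod.Lex.right _ (Prod.Lex.right _ (by omega))
end

def pvStackMeasure (st : List (Int × List (Int × Int) × List (Int × Int))) : Nat :=
  (st.map (fun s => pvBound s.2.1.length)).sum

theorem pvBound_pos (n : Nat) : 0 < pvBound n := by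
  cases n <;> simp [pvBound]

theorem pvChildren_measure_lt (node : Int) (edges : List (Int × Int))
    (route : List (Int × Int)) :
    pvStackMeasure (pvChildrenB node edges route) < pvBound edges.length := by
  have hb : ∀ x ∈ (pvChildrenB node edges route).map (fun s => pvBound s.2.1.length),
      x ≤ pvBound (edges.length - 1) := by
    intro x hx
    simp only [pvChildrenB, List.map_map, List.mem_map, List.mem_filter,
      Function.comp] at hx
    obtain ⟨p, ⟨hp, _⟩, rfl⟩ := hx
    have hlt : p.2 < edges.length := by
      have := List.snd_lt_of_mem_zipIdx hp; omega
    have : (edges.take p.2 ++ edges.drop (p.2 + 1)).length = edges.length - 1 := by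
      simp [List.length_take, List.length_drop]; omega
    simp [this]
  have hlen : (pvChildrenB node edges route).length ≤ edges.length := by
    simp only [pvChildrenB, List.length_map]
    calc (edges.zipIdx.filter (fun p => p.1.1 == node)).length
        ≤ edges.zipIdx.length := List.length_filter_le _ _
      _ = edges.length := by simp
  have hsum := List.sum_le_card_nsmul _ _ hb
  simp only [List.length_map, smul_eq_mul] at hsum
  have : pvStackMeasure (pvChildrenB node edges route)
      ≤ edges.length * pvBound (edges.length - 1) := by
    unfold pvStackMeasure
    calc ((pvChildrenB node edges route).map (fun s => pvBound s.2.1.length)).sum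
        ≤ (pvChildrenB node edges route).length * pvBound (edges.length - 1) := hsum
      _ ≤ edges.length * pvBound (edges.length - 1) :=
          Nat.mul_le_mul_right _ hlen
  cases h : edges.length with
  | zero =>
    rw [h] at this
    simp only [Nat.zero_mul, Nat.le_zero] at this
    simp [this, pvBound]
  | succ m =>
    rw [h] at this
    simp only [Nat.succ_sub_one] at this
    calc pvStackMeasure (pvChildrenB node edges route)
        ≤ (m + 1) * pvBound m := this
      _ < 1 + (m + 1) * pvBound m := by omega
      _ = pvBound (m + 1) := rfl

theorem pvStackMeasure_cons (s : Int × List (Int × Int) × List (Int × Int))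
    (st : List (Int × List (Int × Int) × List (Int × Int))) :
    pvStackMeasure (s :: st) = pvBound s.2.1.length + pvStackMeasure st := by
  simp [pvStackMeasure]

theorem pvStackMeasure_append (a b : List (Int × List (Int × Int) × List (Int × Int))) :
    pvStackMeasure (a ++ b) = pvStackMeasure a + pvStackMeasure b := by
  simp [pvStackMeasure]

-- foldl that appends a singleton is a map
theorem foldl_push {α β : Type} (f : α → β) :
    ∀ (l : List α) (init : List β),
      l.foldl (fun acc x => acc ++ [f x]) init = init ++ l.map f := by
  intro l
  induction l with
  | nil => simp
  | cons x xs ih => intro init; simp [List.foldl_cons, ih]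

-- the children of A's index loop, from index i upward
def childAux (node : Int) (edges : List (Int × Int)) (route : List (Int × Int)) (i : Nat) :
    List (Int × List (Int × Int) × List (Int × Int)) :=
  if h : i < edges.length then
    (if edges[i].1 = node then
      [(edges[i].2, edges.take i ++ edges.drop (i + 1), route ++ [edges[i]])]
     else []) ++ childAux node edges route (i + 1)
  else []
termination_by edges.length - i

theorem goSpec_eq_childAux (node : Int) (edges : List (Int × Int)) (route : List (Int × Int)) :
    ∀ (k i : Nat), edges.length - i = k → ∀ routes,
      pvGoSpec routes node edges route i
        = (childAux node edges route i).foldl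
            (fun rs s => pvRecSpec rs s.1 s.2.1 s.2.2) routes := by
  intro k
  induction k with
  | zero =>
    intro i hk routes
    have h : ¬ i < edges.length := by omega
    rw [pvGoSpec, childAux]
    simp [h]
  | succ m ih =>
    intro i hk routes
    by_cases h : i < edges.length
    · rw [pvGoSpec, childAux]
      simp only [h, dif_pos]
      by_cases he : edges[i].1 = node
      · simp only [he, if_pos, List.singleton_append, List.foldl_cons]
        exact ih (i + 1) (by omega) _
      · simp only [he, if_neg, List.nil_append, not_false_iff]
        exact ih (i + 1) (by omega) _
    · rw [pvGoSpec, childAux]; simp [h]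

theorem childAux_eq_children (node : Int) (edges : List (Int × Int)) (route : List (Int × Int)) :
    ∀ (k i : Nat), edges.length - i = k →
      childAux node edges route i
        = ((edges.zipIdx.drop i).filter (fun p => p.1.1 == node)).map
            (fun p => (p.1.2, edges.take p.2 ++ edges.drop (p.2 + 1), route ++ [p.1])) := by
  intro k
  induction k with
  | zero =>
    intro i hk
    have h : ¬ i < edges.length := by omega
    rw [childAux]
    have : edges.zipIdx.drop i = [] := by
      apply List.drop_eq_nil_of_le; simp; omega
    simp [h, this]
  | succ m ih =>
    intro i hk
    have h : i < edges.length := by omega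
    have hz : i < edges.zipIdx.length := by simp; omega
    have hdrop : edges.zipIdx.drop i = (edges[i], i) :: edges.zipIdx.drop (i + 1) := by
      rw [List.drop_eq_getElem_cons hz, List.getElem_zipIdx]
      simp
    rw [childAux, ih (i + 1) (by omega)]
    simp only [h, dif_pos, hdrop, List.filter_cons]
    by_cases he : edges[i].1 = node
    · simp [he]
    · simp [he]

theorem children_eq (node : Int) (edges : List (Int × Int)) (route : List (Int × Int)) :
    pvChildrenB node edges route = childAux node edges route 0 := by
  rw [childAux_eq_children node edges route edges.length 0 (by simp)]
  simp [pvChildrenB]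

-- A's fueled port computes the reference recursion when the fuel exceeds the edge count
theorem recA_eq_spec :
    ∀ (n : Nat) (edges : List (Int × Int)), edges.length = n →
      ∀ (fuel : Nat), n < fuel → ∀ (routes : List (List (Int × Int))) (node : Int)
        (route : List (Int × Int)),
        findRoutesRecA fuel routes node edges route = pvRecSpec routes node edges route := by
  intro n
  induction n using Nat.strong_induction_on with
  | _ n IH =>
    intro edges hlen fuel hfuel routes node route
    cases fuel with
    | zero => omega
    | succ f =>
      rw [findRoutesRecA, pvRecSpec]
      by_cases hb : node = 0 ∧ 1 < route.length
      · simp [hb]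
      · simp only [hb, if_neg, not_false_iff]
        rw [goSpec_eq_childAux node edges route (edges.length - 0) 0 rfl]
        rw [List.range_eq_range']
        -- fold over the remaining indices equals fold over the remaining children
        have main : ∀ (k i : Nat), edges.length - i = k → ∀ rs,
            (List.range' i k).foldl
              (fun rs i =>
                let e := edges.getD i (0, 0)
                if e.1 = node then
                  findRoutesRecA f rs e.2
                    (edges.take i ++ edges.drop (i + 1)) (route ++ [e])
                else rs) rs
            = (childAux node edges route i).foldl
                (fun rs s => pvRecSpec rs s.1 s.2.1 s.2.2) rs := by
          intro k
          induction k with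
          | zero =>
            intro i hk rs
            have h : ¬ i < edges.length := by omega
            rw [childAux]
            simp [h]
          | succ m ihk =>
            intro i hk rs
            have h : i < edges.length := by omega
            have hget : edges.getD i (0, 0) = edges[i] := List.getD_eq_getElem _ _ h
            have hlen' : (edges.take i ++ edges.drop (i + 1)).length = n - 1 := by
              simp [List.length_take, List.length_drop]; omega
            rw [List.range'_succ, List.foldl_cons, childAux]
            simp only [h, dif_pos, hget]
            by_cases he : edges[i].1 = node
            · simp only [he, if_pos, List.singleton_append, List.foldl_cons]
              rw [IH (n - 1) (by omega) _ hlen' f (by omega)]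
              exact ihk (i + 1) (by omega) _
            · simp only [he, if_neg, List.nil_append, not_false_iff]
              exact ihk (i + 1) (by omega) _
        exact main edges.length 0 (by omega) routes

-- B's fueled stack loop computes the foldl of the reference recursion over the stack
theorem loopB_eq_foldl_spec :
    ∀ (fuel : Nat) (stack : List (Int × List (Int × Int) × List (Int × Int)))
      (routes : List (List (Int × Int))), pvStackMeasure stack ≤ fuel →
      findRoutesLoopB fuel stack routes
        = stack.foldl (fun rs s => pvRecSpec rs s.1 s.2.1 s.2.2) routes := by
  intro fuel
  induction fuel with
  | zero =>
    intro stack routes hm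
    cases stack with
    | nil => rfl
    | cons s rest =>
      exfalso
      rw [pvStackMeasure_cons] at hm
      have := pvBound_pos s.2.1.length
      omega
  | succ f ih =>
    intro stack routes hm
    cases stack with
    | nil => rfl
    | cons s rest =>
      obtain ⟨node, edges, route⟩ := s
      rw [pvStackMeasure_cons] at hm
      have hbp := pvBound_pos edges.length
      rw [findRoutesLoopB]
      by_cases hb : node = 0 ∧ 1 < route.length
      · simp only [hb, List.foldl_cons]
        rw [ih rest (routes ++ [route]) (by simp at hm ⊢; omega)]
        rw [pvRecSpec]
        simp [hb]
      · simp only [hb, if_neg, not_false_iff, List.foldl_cons]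
        have hcm := pvChildren_measure_lt node edges route
        rw [ih (pvChildrenB node edges route ++ rest) routes
            (by rw [pvStackMeasure_append]; simp at hm ⊢; omega)]
        rw [List.foldl_append]
        congr 1
        rw [pvRecSpec]
        simp only [hb, if_neg, not_false_iff]
        rw [goSpec_eq_childAux node edges route (edges.length - 0) 0 rfl, children_eq]

-- ===== VERDICT (by name: the statement is the Claim_ definition above) =====
theorem find_routes_spec : Claim_equal_find_routes := by
  intro routes current_node remaining_edges current_route _
  unfold Spec_find_routes find_routes find_routes_alt
  rw [loopB_eq_foldl_spec _ _ _ (by rw [pvStackMeasure_cons]; simp [pvStackMeasure])]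
  rw [recA_eq_spec remaining_edges.length remaining_edges rfl _ (by omega)]
  simp only [List.foldl_cons, List.foldl_nil]
  rw [foldl_push]
  simp only [List.nil_append]
  apply List.map_congr_left
  intro r _
  rw [foldl_push]
  simp
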